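-- pv_equiv track=rewrite | github.com/moaylesbury/Language-Competency | python-test.py | list_of_n_lists
-- ===== SOURCE A (Python) =====
-- def list_of_n_lists(n:int) -> list:
--     # from i to n generate n lists, with each list containing i numbers
--
--     inner_list = []
--     outer_list = []
--
--     for outer_list_n in range(1, n+1):
--         inner_list = []
--         for inner_list_n in range(1, outer_list_n+1):
--             inner_list += [inner_list_n]
--         outer_list += [inner_list]
--
--     return outer_list
-- ===== SOURCE B (Python) =====
-- def list_of_n_lists(n: int) -> list:
--     result = []
--     prev = []
--     for i in range(1, n + 1):
--         prev = prev + [i]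
--         result.append(prev)
--     return result
-- ===== Notes on version B (the rewrite author's own statement) =====
-- stated objective: alternative
-- what changed: Replaces the nested loop (each row rebuilt from scratch) with a single loop that carries a running prefix, extending it by one element per iteration and appending a copy as the next row.
import Mathlib
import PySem

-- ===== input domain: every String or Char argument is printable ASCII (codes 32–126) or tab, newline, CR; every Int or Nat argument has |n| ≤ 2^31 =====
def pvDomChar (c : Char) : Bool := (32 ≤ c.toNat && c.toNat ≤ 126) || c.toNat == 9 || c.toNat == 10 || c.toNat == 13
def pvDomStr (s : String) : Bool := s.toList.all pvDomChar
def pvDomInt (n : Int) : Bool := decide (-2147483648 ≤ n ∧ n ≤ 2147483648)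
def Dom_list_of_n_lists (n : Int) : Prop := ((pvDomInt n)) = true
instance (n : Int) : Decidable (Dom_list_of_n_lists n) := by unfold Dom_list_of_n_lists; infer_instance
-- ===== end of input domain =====

-- B replaces A's nested loop (each row rebuilt from scratch) with one loop carrying a running prefix.

-- ===== PORT A =====
def list_of_n_lists (n : Int) : List (List Int) :=
  (PySem.List.pyRange 1 (n + 1) 1).foldl
    (fun outer i =>
      outer ++ [(PySem.List.pyRange 1 (i + 1) 1).foldl (fun inner j => inner ++ [j]) []])
    []

-- ===== PORT B =====
def list_of_n_lists_alt (n : Int) : List (List Int) :=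
  ((PySem.List.pyRange 1 (n + 1) 1).foldl
    (fun (st : List Int × List (List Int)) i =>
      let prev := st.1 ++ [i]
      (prev, st.2 ++ [prev]))
    ([], [])).2

-- ===== PRECONDITION & SPEC =====
def Spec_list_of_n_lists (n : Int) (out : List (List Int)) : Prop := out = list_of_n_lists_alt n
instance (n : Int) (out : List (List Int)) : Decidable (Spec_list_of_n_lists n out) := by unfold Spec_list_of_n_lists; infer_instance

-- ===== CLAIM (what is proved, stated in full; the proofs are below) =====
def Claim_equal_list_of_n_lists : Prop := ∀ (n : Int), Dom_list_of_n_lists n → Spec_list_of_n_lists n (list_of_n_lists n)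

-- ===== LEMMAS AND PROOFS =====

-- B's loop invariant: starting from prefix pyRange 1 a 1, folding over pyRange a b 1
-- yields the full prefix and appends each successive prefix as a row.
theorem alt_fold_invariant (k : Nat) : ∀ (a : Int) (acc : List (List Int)), 1 ≤ a →
    (PySem.List.pyRange a (a + k) 1).foldl
      (fun (st : List Int × List (List Int)) i =>
        let prev := st.1 ++ [i]
        (prev, st.2 ++ [prev]))
      (PySem.List.pyRange 1 a 1, acc)
    = (PySem.List.pyRange 1 (a + k) 1,
       acc ++ (PySem.List.pyRange a (a + k) 1).map (fun i => PySem.List.pyRange 1 (i + 1) 1)) := by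
  induction k with
  | zero =>
    intro a acc _
    rw [PySem.List.pyRange_one_eq_nil (by omega : a + ((0:Nat):Int) ≤ a)]; simp
  | succ m ih =>
    intro a acc ha
    rw [PySem.List.pyRange_one_cons (by push_cast; omega : a < a + (m + 1 : Nat))]
    simp only [List.foldl_cons, List.map_cons]
    rw [← PySem.List.pyRange_one_succ_right (by omega : (1:Int) ≤ a)]
    have h1 : a + ((m : Nat) + 1 : Nat) = (a + 1) + (m : Nat) := by push_cast; omega
    rw [h1, ih (a + 1) _ (by omega)]
    simp

theorem a_eq_map (n : Int) :
    list_of_n_lists n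
      = (PySem.List.pyRange 1 (n + 1) 1).map (fun i => PySem.List.pyRange 1 (i + 1) 1) := by
  unfold list_of_n_lists
  simp only [PySem.List.foldl_append_singleton_eq_self, List.nil_append]
  rw [PySem.List.foldl_append_singleton_eq_map]
  simp

-- ===== VERDICT (by name: the statement is the Claim_ definition above) =====
theorem list_of_n_lists_spec : Claim_equal_list_of_n_lists := by
  intro n _
  show list_of_n_lists n = list_of_n_lists_alt n
  rw [a_eq_map]
  unfold list_of_n_lists_alt
  by_cases hn : n ≤ 0
  · rw [PySem.List.pyRange_one_eq_nil (by omega)]; simp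
  · have h : (1:Int) + (n.toNat : Nat) = n + 1 := by omega
    have inv := alt_fold_invariant n.toNat 1 [] le_rfl
    rw [PySem.List.pyRange_one_eq_nil (le_rfl : (1:Int) ≤ 1), h] at inv
    rw [inv]
    simp
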